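-- pv_equiv track=rewrite | github.com/dododopizza/check | a.py | insert1
-- ===== SOURCE A (Python) =====
-- def insert1(A:list,S1,S2):
--     B = []
--     mx = max(A)
--     key = 0
--     for elem in A:
--         if elem == mx and key == 0:
--             B += S1,
--             B += elem,
--             B += S2,
--             key = 1
--         else:
--             B += elem,
--     return B
-- ===== SOURCE B (Python) =====
-- def insert1(A: list, S1, S2):
--     mx = max(A)
--     i = A.index(mx)
--     return A[:i] + [S1, A[i], S2] + A[i+1:]
-- ===== Notes on version B (the rewrite author's own statement) =====
-- stated objective: simpler
-- what changed: Replaces the flag-tracking accumulation loop with a locate-then-splice: compute the first index of the maximum once and return the three slices concatenated.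
import Mathlib
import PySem

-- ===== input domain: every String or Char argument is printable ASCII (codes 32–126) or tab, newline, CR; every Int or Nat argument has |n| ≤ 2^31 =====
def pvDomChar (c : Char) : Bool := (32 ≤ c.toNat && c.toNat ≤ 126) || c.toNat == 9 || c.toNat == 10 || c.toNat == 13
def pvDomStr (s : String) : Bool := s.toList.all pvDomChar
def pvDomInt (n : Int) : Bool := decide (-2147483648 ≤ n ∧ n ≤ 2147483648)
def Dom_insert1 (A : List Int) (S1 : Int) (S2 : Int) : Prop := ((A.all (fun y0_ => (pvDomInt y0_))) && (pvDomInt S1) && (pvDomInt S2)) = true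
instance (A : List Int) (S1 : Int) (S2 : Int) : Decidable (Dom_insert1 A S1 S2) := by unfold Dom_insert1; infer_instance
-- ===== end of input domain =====

-- B replaces A's flag-tracking accumulation loop with a locate-then-splice formulation (objective: simpler).


-- ===== PORT A =====
-- the loop body: B += S1, elem, S2 and key := 1 on the first maximal element, else B += elem
def insert1Step (mx S1 S2 : Int) (st : List Int × Int) (elem : Int) : List Int × Int :=
  if elem = mx ∧ st.2 = 0 then (st.1 ++ [S1, elem, S2], 1) else (st.1 ++ [elem], st.2)

def insert1 (A : List Int) (S1 : Int) (S2 : Int) : List Int :=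
  match PySem.List.max? A (fun x => x) with
  | none => []          -- max([]) raises ValueError: excluded by Pre_insert1
  | some mx => (A.foldl (insert1Step mx S1 S2) ([], 0)).1

-- ===== PORT B =====
def insert1_alt (A : List Int) (S1 : Int) (S2 : Int) : List Int :=
  match PySem.List.max? A (fun x => x) with
  | none => []          -- max([]) raises ValueError: excluded by Pre_insert1
  | some mx =>
    match PySem.List.index? A mx with
    | none => []        -- unreachable: the maximum is an element of A
    | some i =>
      match PySem.List.pyGet? A (i : Int) with
      | none => []      -- unreachable: i is a valid index
      | some ai =>
        PySem.List.slice A none (some (i : Int)) ++ [S1, ai, S2]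
          ++ PySem.List.slice A (some ((i : Int) + 1)) none

-- ===== PRECONDITION & SPEC =====
-- Pre_ excludes only the empty list, on which A (and B) raise ValueError from max([]).
def Pre_insert1 (A : List Int) (_S1 : Int) (_S2 : Int) : Prop := A ≠ []
instance (A : List Int) (S1 : Int) (S2 : Int) : Decidable (Pre_insert1 A S1 S2) := by unfold Pre_insert1; infer_instance
def pvWitness_insert1 : List Int × Int × Int := ([1, 3, 2, 3], 7, 8)

def Spec_insert1 (A : List Int) (S1 : Int) (S2 : Int) (out : List Int) : Prop := out = insert1_alt A S1 S2
instance (A : List Int) (S1 : Int) (S2 : Int) (out : List Int) : Decidable (Spec_insert1 A S1 S2 out) := by unfold Spec_insert1; infer_instance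

-- ===== CLAIM (what is proved, stated in full; the proofs are below) =====
def Claim_equal_insert1 : Prop := ∀ (A : List Int) (S1 : Int) (S2 : Int), Dom_insert1 A S1 S2 → Pre_insert1 A S1 S2 → Spec_insert1 A S1 S2 (insert1 A S1 S2)

-- ===== LEMMAS AND PROOFS =====

-- before the maximum is met (key = 0), each element ≠ mx is copied unchanged
theorem insert1_foldl_no_max (mx S1 S2 : Int) (pre B : List Int) (h : mx ∉ pre) :
    pre.foldl (insert1Step mx S1 S2) (B, 0) = (B ++ pre, 0) := by
  induction pre generalizing B with
  | nil => simp
  | cons x t ih =>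
    simp only [List.mem_cons, not_or] at h
    simp only [List.foldl_cons, insert1Step]
    rw [if_neg (by simpa using fun e => h.1 e.symm)]
    rw [ih _ h.2]
    simp

-- after the maximum was met (key = 1), every element is copied unchanged
theorem insert1_foldl_done (mx S1 S2 : Int) (suf B : List Int) :
    suf.foldl (insert1Step mx S1 S2) (B, 1) = (B ++ suf, 1) := by
  induction suf generalizing B with
  | nil => simp
  | cons x t ih =>
    simp only [List.foldl_cons, insert1Step]
    simp only [show (1 : Int) = 0 ↔ False by norm_num, and_false, if_neg, not_false_iff]
    simp [ih]

-- ===== VERDICT (by name: the statement is the Claim_ definition above) =====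
theorem insert1_spec : Claim_equal_insert1 := by
  intro A S1 S2 _ hne
  unfold Spec_insert1 insert1 insert1_alt
  cases hmx : PySem.List.max? A (fun x => x) with
  | none => rfl
  | some mx =>
    dsimp only
    have hmem : mx ∈ A := PySem.List.max?_mem hmx
    have hidx : ∃ k, PySem.List.index? A mx = some k := by
      rcases Option.isSome_iff_exists.mp ((PySem.List.index?_isSome_iff A mx).mpr hmem) with ⟨k, hk⟩
      exact ⟨k, hk⟩
    rcases hidx with ⟨i, hi⟩
    rcases (PySem.List.index?_eq_some_iff A mx i).mp hi with ⟨pre, suf, hA, hlen, hnot⟩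
    rw [hi]
    dsimp only
    have hget : PySem.List.pyGet? A (i : Int) = some mx := by
      rcases PySem.List.getElem_of_index?_eq_some hi with ⟨hk, hval, _⟩
      rw [PySem.List.pyGet?_natCast]
      simp [hval, hk]
    rw [hget]
    dsimp only
    have h1 : PySem.List.slice A none (some (i : Int)) = A.take i :=
      PySem.List.slice_to_natCast A i
    have h2 : PySem.List.slice A (some ((i : Int) + 1)) none = A.drop (i + 1) := by
      have := PySem.List.slice_from_natCast A (i + 1)
      simpa using this
    rw [h1, h2]
    subst hA
    subst hlen
    rw [List.foldl_append, insert1_foldl_no_max mx S1 S2 pre [] hnot]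
    simp only [List.foldl_cons, insert1Step]
    simp only [and_true, if_true, List.nil_append]
    rw [insert1_foldl_done]
    simp
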